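-- pv_equiv track=rewrite | github.com/Yunukas/MaiOpinion | agents/diagnostic_chest.py | _mock_analysis
-- ===== SOURCE A (Python) =====
-- def _mock_analysis(condition: str) -> str:
--     """Mock chest X-ray analysis based on condition keywords"""
--     condition_lower = condition.lower()
--
--     # Pneumonia
--     if any(word in condition_lower for word in ['cough', 'fever', 'pneumonia', 'infection']):
--         return "Bilateral interstitial infiltrates visible in lower lung fields, consistent with community-acquired pneumonia. Increased opacity in right lower lobe with possible consolidation. No pleural effusion or pneumothorax detected. Cardiac silhouette within normal limits."
--
--     # Chest pain
--     if any(word in condition_lower for word in ['chest pain', 'pain']):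
--         return "Chest X-ray shows clear lung fields bilaterally with no acute infiltrates or consolidation. Cardiac silhouette appears mildly enlarged, suggesting possible cardiomegaly. No evidence of pneumothorax or pleural effusion. Recommend cardiac evaluation for chest pain etiology."
--
--     # Difficulty breathing
--     if any(word in condition_lower for word in ['breath', 'breathing', 'dyspnea', 'shortness']):
--         return "Bilateral lung hyperinflation noted with flattened diaphragms, suggestive of chronic obstructive pulmonary disease (COPD) or asthma exacerbation. No acute infiltrates. Increased anteroposterior diameter consistent with air trapping. Recommend pulmonary function testing."
--
--     # Fluid/edema
--     if any(word in condition_lower for word in ['fluid', 'edema', 'swelling']):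
--         return "Bilateral perihilar haziness and Kerley B lines present, consistent with pulmonary edema. Enlarged cardiac silhouette indicating cardiomegaly. Small bilateral pleural effusions noted. Findings suggestive of congestive heart failure. Urgent cardiology consultation recommended."
--
--     # TB or chronic cough
--     if any(word in condition_lower for word in ['tuberculosis', 'tb', 'chronic', 'night sweats']):
--         return "Upper lobe predominant fibronodular opacities with cavitary lesions identified in the right apex. Findings are suspicious for pulmonary tuberculosis. Calcified granulomas present suggesting old healed infection with possible reactivation. Sputum culture and AFB testing recommended."
--
--     # Default
--     return "Chest X-ray demonstrates increased interstitial markings in bilateral lower lung fields with possible early infiltrate. Cardiomediastinal silhouette appears within normal limits. No pleural effusion or pneumothorax. Clinical correlation recommended."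
-- ===== SOURCE B (Python) =====
-- # B: data-driven — one pass over a flat keyword table taking the minimal matching
-- # group index, then one indexed lookup into the report table.
--
-- REPORTS = [
--     "Bilateral interstitial infiltrates visible in lower lung fields, consistent with community-acquired pneumonia. Increased opacity in right lower lobe with possible consolidation. No pleural effusion or pneumothorax detected. Cardiac silhouette within normal limits.",
--     "Chest X-ray shows clear lung fields bilaterally with no acute infiltrates or consolidation. Cardiac silhouette appears mildly enlarged, suggesting possible cardiomegaly. No evidence of pneumothorax or pleural effusion. Recommend cardiac evaluation for chest pain etiology.",
--     "Bilateral lung hyperinflation noted with flattened diaphragms, suggestive of chronic obstructive pulmonary disease (COPD) or asthma exacerbation. No acute infiltrates. Increased anteroposterior diameter consistent with air trapping. Recommend pulmonary function testing.",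
--     "Bilateral perihilar haziness and Kerley B lines present, consistent with pulmonary edema. Enlarged cardiac silhouette indicating cardiomegaly. Small bilateral pleural effusions noted. Findings suggestive of congestive heart failure. Urgent cardiology consultation recommended.",
--     "Upper lobe predominant fibronodular opacities with cavitary lesions identified in the right apex. Findings are suspicious for pulmonary tuberculosis. Calcified granulomas present suggesting old healed infection with possible reactivation. Sputum culture and AFB testing recommended.",
--     "Chest X-ray demonstrates increased interstitial markings in bilateral lower lung fields with possible early infiltrate. Cardiomediastinal silhouette appears within normal limits. No pleural effusion or pneumothorax. Clinical correlation recommended.",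
-- ]
--
-- KEYWORDS = [
--     ('cough', 0), ('fever', 0), ('pneumonia', 0), ('infection', 0),
--     ('chest pain', 1), ('pain', 1),
--     ('breath', 2), ('breathing', 2), ('dyspnea', 2), ('shortness', 2),
--     ('fluid', 3), ('edema', 3), ('swelling', 3),
--     ('tuberculosis', 4), ('tb', 4), ('chronic', 4), ('night sweats', 4),
-- ]
--
--
-- def _mock_analysis(condition: str) -> str:
--     cl = condition.lower()
--     idx = 5
--     for kw, i in KEYWORDS:
--         if kw in cl and i < idx:
--             idx = i
--     return REPORTS[idx]
-- ===== Notes on version B (the rewrite author's own statement) =====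
-- stated objective: simpler
-- what changed: Replaces the six hard-coded if/any branches by a data table: one pass over a flat (keyword, group) list keeps the minimal matching group index, then a single indexed lookup into the report list returns the answer.
import Mathlib
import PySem

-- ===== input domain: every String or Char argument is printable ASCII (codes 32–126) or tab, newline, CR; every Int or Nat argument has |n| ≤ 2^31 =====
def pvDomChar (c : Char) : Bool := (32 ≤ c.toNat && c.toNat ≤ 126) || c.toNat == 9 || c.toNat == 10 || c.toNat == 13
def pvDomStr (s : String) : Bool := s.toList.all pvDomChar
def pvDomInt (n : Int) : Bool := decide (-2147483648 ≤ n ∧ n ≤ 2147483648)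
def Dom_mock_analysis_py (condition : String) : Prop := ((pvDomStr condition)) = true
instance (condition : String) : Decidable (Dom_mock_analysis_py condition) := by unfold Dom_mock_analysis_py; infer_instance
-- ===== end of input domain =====

-- B replaces A's six-way if-chain by a table: one pass over a flat keyword list taking
-- the minimal matching group index, then one lookup into the report list (same values).

-- ===== PORT A =====
def mock_analysis_py (condition : String) : String :=
  let condition_lower := PySem.Str.lower condition
  if (["cough", "fever", "pneumonia", "infection"].any (fun w => PySem.Str.isIn w condition_lower)) = true then
    "Bilateral interstitial infiltrates visible in lower lung fields, consistent with community-acquired pneumonia. Increased opacity in right lower lobe with possible consolidation. No pleural effusion or pneumothorax detected. Cardiac silhouette within normal limits."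
  else if (["chest pain", "pain"].any (fun w => PySem.Str.isIn w condition_lower)) = true then
    "Chest X-ray shows clear lung fields bilaterally with no acute infiltrates or consolidation. Cardiac silhouette appears mildly enlarged, suggesting possible cardiomegaly. No evidence of pneumothorax or pleural effusion. Recommend cardiac evaluation for chest pain etiology."
  else if (["breath", "breathing", "dyspnea", "shortness"].any (fun w => PySem.Str.isIn w condition_lower)) = true then
    "Bilateral lung hyperinflation noted with flattened diaphragms, suggestive of chronic obstructive pulmonary disease (COPD) or asthma exacerbation. No acute infiltrates. Increased anteroposterior diameter consistent with air trapping. Recommend pulmonary function testing."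
  else if (["fluid", "edema", "swelling"].any (fun w => PySem.Str.isIn w condition_lower)) = true then
    "Bilateral perihilar haziness and Kerley B lines present, consistent with pulmonary edema. Enlarged cardiac silhouette indicating cardiomegaly. Small bilateral pleural effusions noted. Findings suggestive of congestive heart failure. Urgent cardiology consultation recommended."
  else if (["tuberculosis", "tb", "chronic", "night sweats"].any (fun w => PySem.Str.isIn w condition_lower)) = true then
    "Upper lobe predominant fibronodular opacities with cavitary lesions identified in the right apex. Findings are suspicious for pulmonary tuberculosis. Calcified granulomas present suggesting old healed infection with possible reactivation. Sputum culture and AFB testing recommended."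
  else
    "Chest X-ray demonstrates increased interstitial markings in bilateral lower lung fields with possible early infiltrate. Cardiomediastinal silhouette appears within normal limits. No pleural effusion or pneumothorax. Clinical correlation recommended."

-- ===== PORT B =====
def pvReports : List String :=
  [ "Bilateral interstitial infiltrates visible in lower lung fields, consistent with community-acquired pneumonia. Increased opacity in right lower lobe with possible consolidation. No pleural effusion or pneumothorax detected. Cardiac silhouette within normal limits."
  , "Chest X-ray shows clear lung fields bilaterally with no acute infiltrates or consolidation. Cardiac silhouette appears mildly enlarged, suggesting possible cardiomegaly. No evidence of pneumothorax or pleural effusion. Recommend cardiac evaluation for chest pain etiology."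
  , "Bilateral lung hyperinflation noted with flattened diaphragms, suggestive of chronic obstructive pulmonary disease (COPD) or asthma exacerbation. No acute infiltrates. Increased anteroposterior diameter consistent with air trapping. Recommend pulmonary function testing."
  , "Bilateral perihilar haziness and Kerley B lines present, consistent with pulmonary edema. Enlarged cardiac silhouette indicating cardiomegaly. Small bilateral pleural effusions noted. Findings suggestive of congestive heart failure. Urgent cardiology consultation recommended."
  , "Upper lobe predominant fibronodular opacities with cavitary lesions identified in the right apex. Findings are suspicious for pulmonary tuberculosis. Calcified granulomas present suggesting old healed infection with possible reactivation. Sputum culture and AFB testing recommended."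
  , "Chest X-ray demonstrates increased interstitial markings in bilateral lower lung fields with possible early infiltrate. Cardiomediastinal silhouette appears within normal limits. No pleural effusion or pneumothorax. Clinical correlation recommended." ]

def pvKeywords : List (String × Nat) :=
  [ ("cough", 0), ("fever", 0), ("pneumonia", 0), ("infection", 0)
  , ("chest pain", 1), ("pain", 1)
  , ("breath", 2), ("breathing", 2), ("dyspnea", 2), ("shortness", 2)
  , ("fluid", 3), ("edema", 3), ("swelling", 3)
  , ("tuberculosis", 4), ("tb", 4), ("chronic", 4), ("night sweats", 4) ]

-- the loop body of Source B: 'if kw in cl and i < idx: idx = i'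
def pvStep (cl : String) (idx : Nat) (p : String × Nat) : Nat :=
  if PySem.Str.isIn p.1 cl = true ∧ p.2 < idx then p.2 else idx

def mock_analysis_py_alt (condition : String) : String :=
  let cl := PySem.Str.lower condition
  let idx := pvKeywords.foldl (pvStep cl) 5
  PySem.List.pyGetD pvReports (idx : Int) ""

-- ===== PRECONDITION & SPEC =====
def Spec_mock_analysis_py (condition : String) (out : String) : Prop := out = mock_analysis_py_alt condition
instance (condition : String) (out : String) : Decidable (Spec_mock_analysis_py condition out) := by unfold Spec_mock_analysis_py; infer_instance

-- ===== CLAIM (what is proved, stated in full; the proofs are below) =====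
def Claim_equal_mock_analysis_py : Prop := ∀ (condition : String), Dom_mock_analysis_py condition → Spec_mock_analysis_py condition (mock_analysis_py condition)

-- ===== LEMMAS AND PROOFS =====

-- folding the loop body over a constant-index keyword segment is a single any-test
theorem pv_fold_const (cl : String) (g : Nat) (ks : List String) (acc : Nat) :
    (ks.map (fun k => (k, g))).foldl (pvStep cl) acc
      = if (ks.any (fun w => PySem.Str.isIn w cl)) = true ∧ g < acc then g else acc := by
  induction ks generalizing acc with
  | nil => simp
  | cons k ks ih =>
    simp only [List.map, List.foldl, List.any_cons, ih, pvStep]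
    by_cases hB : PySem.Str.isIn k cl = true <;>
    by_cases hA : (ks.any fun w => PySem.Str.isIn w cl) = true <;>
      simp only [hB, hA, Bool.or_eq_true, true_or, or_true, true_and, and_true] <;>
      split_ifs <;> first | rfl | omega | simp_all

theorem pv_keywords_split :
    pvKeywords =
      (["cough", "fever", "pneumonia", "infection"].map (fun k => (k, 0)))
      ++ (["chest pain", "pain"].map (fun k => (k, 1)))
      ++ (["breath", "breathing", "dyspnea", "shortness"].map (fun k => (k, 2)))
      ++ (["fluid", "edema", "swelling"].map (fun k => (k, 3)))
      ++ (["tuberculosis", "tb", "chronic", "night sweats"].map (fun k => (k, 4))) := rfl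

-- the fold over the whole keyword table equals A's branch-selection chain
set_option maxHeartbeats 1000000 in
theorem pv_idx (cl : String) :
    pvKeywords.foldl (pvStep cl) 5
      = if (["cough", "fever", "pneumonia", "infection"].any (fun w => PySem.Str.isIn w cl)) = true then 0
        else if (["chest pain", "pain"].any (fun w => PySem.Str.isIn w cl)) = true then 1
        else if (["breath", "breathing", "dyspnea", "shortness"].any (fun w => PySem.Str.isIn w cl)) = true then 2
        else if (["fluid", "edema", "swelling"].any (fun w => PySem.Str.isIn w cl)) = true then 3
        else if (["tuberculosis", "tb", "chronic", "night sweats"].any (fun w => PySem.Str.isIn w cl)) = true then 4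
        else 5 := by
  rw [pv_keywords_split]
  simp only [List.foldl_append, pv_fold_const]
  by_cases h0 : (["cough", "fever", "pneumonia", "infection"].any (fun w => PySem.Str.isIn w cl)) = true
  · simp_all
  · 
    by_cases h1 : (["chest pain", "pain"].any (fun w => PySem.Str.isIn w cl)) = true
    · simp_all
    · 
      by_cases h2 : (["breath", "breathing", "dyspnea", "shortness"].any (fun w => PySem.Str.isIn w cl)) = true
      · simp_all
      · 
        by_cases h3 : (["fluid", "edema", "swelling"].any (fun w => PySem.Str.isIn w cl)) = true
        · simp_all
        · 
          by_cases h4 : (["tuberculosis", "tb", "chronic", "night sweats"].any (fun w => PySem.Str.isIn w cl)) = true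
          · simp_all
          · 
            simp_all

-- ===== VERDICT (by name: the statement is the Claim_ definition above) =====
theorem mock_analysis_py_spec : Claim_equal_mock_analysis_py := by
  intro condition _
  unfold Spec_mock_analysis_py
  simp only [mock_analysis_py, mock_analysis_py_alt]
  set cl := PySem.Str.lower condition with hcl
  rw [pv_idx cl]
  by_cases h0 : (["cough", "fever", "pneumonia", "infection"].any (fun w => PySem.Str.isIn w cl)) = true
  · simp_all <;> rfl
  · 
    by_cases h1 : (["chest pain", "pain"].any (fun w => PySem.Str.isIn w cl)) = true
    · simp_all <;> rfl
    · 
      by_cases h2 : (["breath", "breathing", "dyspnea", "shortness"].any (fun w => PySem.Str.isIn w cl)) = true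
      · simp_all <;> rfl
      · 
        by_cases h3 : (["fluid", "edema", "swelling"].any (fun w => PySem.Str.isIn w cl)) = true
        · simp_all <;> rfl
        · 
          by_cases h4 : (["tuberculosis", "tb", "chronic", "night sweats"].any (fun w => PySem.Str.isIn w cl)) = true
          · simp_all <;> rfl
          · 
            simp_all <;> rfl
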